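-- pv_equiv track=rewrite | github.com/mattbogucki/PointsListValidator2 | test.py | has_invalid_casing
-- ===== SOURCE A (Python) =====
-- def has_invalid_casing(words) -> bool:
--     is_all_caps = True
--     for word in words:
--         for i in range(len(word)):
--             if i == 0 and word[i].islower():
--                 return True
--             elif i != 0 and word[i].islower():
--                 is_all_caps = False
--     return True if is_all_caps else False
-- ===== SOURCE B (Python) =====
-- def has_invalid_casing(words) -> bool:
--     if any(word and word[0].islower() for word in words):
--         return True
--     return not any(c.islower() for word in words for c in word[1:])
-- ===== Notes on version B (the rewrite author's own statement) =====
-- stated objective: simpler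
-- what changed: Replaces the single interleaved indexed pass carrying an is_all_caps flag (with an early return mid-scan) by two independent short-circuiting scans: one over first characters, one over the tails word[1:].
import Mathlib
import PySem

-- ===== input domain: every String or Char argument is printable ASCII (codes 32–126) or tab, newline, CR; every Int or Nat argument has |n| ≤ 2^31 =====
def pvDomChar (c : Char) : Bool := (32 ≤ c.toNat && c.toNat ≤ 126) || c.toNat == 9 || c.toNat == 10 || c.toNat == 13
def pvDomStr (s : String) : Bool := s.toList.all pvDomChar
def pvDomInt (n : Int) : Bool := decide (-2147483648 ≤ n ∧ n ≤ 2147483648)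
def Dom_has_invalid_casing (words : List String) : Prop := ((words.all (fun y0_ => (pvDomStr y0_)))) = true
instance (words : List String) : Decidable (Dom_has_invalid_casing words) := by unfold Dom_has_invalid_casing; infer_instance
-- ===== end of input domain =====

-- B replaces A's single interleaved flag-carrying pass by two independent short-circuiting scans (simpler).

-- ===== PORT A =====
-- inner loop: for i in range(len(word)); 'none' = the early 'return True'
def hicInnerA : List Char → Nat → Bool → Option Bool
  | [], _, flag => some flag
  | c :: rest, i, flag =>
    if i == 0 && PySem.Chars.islower c then none
    else if i != 0 && PySem.Chars.islower c then hicInnerA rest (i + 1) false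
    else hicInnerA rest (i + 1) flag

-- outer loop over words, threading is_all_caps
def hicOuterA : List String → Bool → Bool
  | [], flag => if flag then true else false
  | w :: ws, flag =>
    match hicInnerA w.toList 0 flag with
    | none => true
    | some flag' => hicOuterA ws flag'

def has_invalid_casing (words : List String) : Bool := hicOuterA words true

-- ===== PORT B =====
-- 'word and word[0].islower()'
def hicFirstLower (w : String) : Bool :=
  match w.toList with
  | [] => false
  | c :: _ => PySem.Chars.islower c

-- 'any(c.islower() for c in word[1:])'
def hicTailLower (w : String) : Bool :=
  (PySem.List.slice w.toList (some 1) none).any PySem.Chars.islower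

def has_invalid_casing_alt (words : List String) : Bool :=
  if words.any hicFirstLower then true
  else !(words.any hicTailLower)

-- ===== PRECONDITION & SPEC =====
def Spec_has_invalid_casing (words : List String) (out : Bool) : Prop := out = has_invalid_casing_alt words
instance (words : List String) (out : Bool) : Decidable (Spec_has_invalid_casing words out) := by unfold Spec_has_invalid_casing; infer_instance

-- ===== CLAIM (what is proved, stated in full; the proofs are below) =====
def Claim_equal_has_invalid_casing : Prop := ∀ (words : List String), Dom_has_invalid_casing words → Spec_has_invalid_casing words (has_invalid_casing words)

-- ===== LEMMAS AND PROOFS =====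

-- once past index 0, the inner loop just clears the flag on any lowercase char
theorem hicInnerA_pos (cs : List Char) (i : Nat) (flag : Bool) (hi : i ≠ 0) :
    hicInnerA cs i flag = some (flag && !cs.any PySem.Chars.islower) := by
  induction cs generalizing i flag with
  | nil => simp [hicInnerA]
  | cons c rest ih =>
    simp only [hicInnerA, List.any_cons]
    have h0 : (i == 0) = false := by simp [hi]
    have h1 := ih (i + 1) false (Nat.succ_ne_zero i)
    have h2 := ih (i + 1) flag (Nat.succ_ne_zero i)
    by_cases hc : PySem.Chars.islower c = true
    · simp [hi, hc, h1]
    · simp at hc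
      simp [hc, h2]

theorem hicInnerA_zero (w : String) (flag : Bool) :
    hicInnerA w.toList 0 flag =
      if hicFirstLower w then none else some (flag && !hicTailLower w) := by
  unfold hicFirstLower hicTailLower
  cases h : w.toList with
  | nil => simp [hicInnerA, PySem.List.slice]
  | cons c rest =>
    simp only [hicInnerA, PySem.List.slice_from_one]
    by_cases hc : PySem.Chars.islower c = true
    · simp [hc]
    · simp at hc
      simp [hc, hicInnerA_pos rest 1 flag (by omega)]

theorem hicOuterA_eq (ws : List String) (flag : Bool) :
    hicOuterA ws flag =
      (if ws.any hicFirstLower then true else flag && !(ws.any hicTailLower)) := by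
  induction ws generalizing flag with
  | nil => cases flag <;> simp [hicOuterA]
  | cons w ws ih =>
    simp only [hicOuterA, hicInnerA_zero, List.any_cons]
    by_cases hf : hicFirstLower w = true
    · simp [hf]
    · simp at hf
      simp only [hf, Bool.false_or, Bool.false_eq_true, if_false]
      rw [ih]
      by_cases ha : ws.any hicFirstLower = true
      · simp [ha]
      · simp at ha
        simp [Bool.and_assoc]

-- ===== VERDICT (by name: the statement is the Claim_ definition above) =====
theorem has_invalid_casing_spec : Claim_equal_has_invalid_casing := by
  intro words _
  unfold Spec_has_invalid_casing has_invalid_casing has_invalid_casing_alt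
  rw [hicOuterA_eq]
  split <;> simp
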